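-- pv_equiv track=rewrite | github.com/Aurigraph-DLT-Corp/Aurigraph-Developer-Toolkit-and-SDK | .archive/worktrees/agent-1.3/aurigraph-av10-7/aurigraph-v11-standalone/analyze-jfr.py | parse_execution_samples
-- ===== SOURCE A (Python) =====
-- from typing import Dict, List, Tuple
--
-- def parse_execution_samples(output: str) -> Tuple[int, int, int, int]:
--     """Parse execution samples from jfr output"""
--     total_samples = 0
--     virtual_thread_samples = 0
--     forkjoin_samples = 0
--     application_samples = 0
--
--     for line in output.split('\n'):
--         if 'sampledThread =' in line:
--             total_samples += 1
--             thread_name = line.split('"')[1] if '"' in line else ''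
--
--             if not thread_name:  # Unnamed virtual threads
--                 virtual_thread_samples += 1
--             elif 'ForkJoinPool' in thread_name or 'VirtualThread' in thread_name:
--                 forkjoin_samples += 1
--             elif 'executor-thread' in thread_name or thread_name.startswith('io.'):
--                 application_samples += 1
--
--     return total_samples, virtual_thread_samples, forkjoin_samples, application_samples
-- ===== SOURCE B (Python) =====
-- def parse_execution_samples(output):
--     """Parse execution samples from jfr output"""
--     names = [line.split('"')[1] if '"' in line else ''
--              for line in output.split('\n') if 'sampledThread =' in line]
--
--     def hot(n):
--         return 'ForkJoinPool' in n or 'VirtualThread' in n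
--
--     def app(n):
--         return 'executor-thread' in n or n.startswith('io.')
--
--     total_samples = len(names)
--     virtual_thread_samples = sum(1 for n in names if not n)
--     forkjoin_samples = sum(1 for n in names if n and hot(n))
--     application_samples = sum(1 for n in names if n and not hot(n) and app(n))
--     return total_samples, virtual_thread_samples, forkjoin_samples, application_samples
-- ===== Notes on version B (the rewrite author's own statement) =====
-- stated objective: alternative
-- what changed: Replaces the single fused loop with four mutating counters by one comprehension that extracts the thread names and four independent targeted counts over that list (the elif priority re-encoded in the guards).
import Mathlib
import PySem

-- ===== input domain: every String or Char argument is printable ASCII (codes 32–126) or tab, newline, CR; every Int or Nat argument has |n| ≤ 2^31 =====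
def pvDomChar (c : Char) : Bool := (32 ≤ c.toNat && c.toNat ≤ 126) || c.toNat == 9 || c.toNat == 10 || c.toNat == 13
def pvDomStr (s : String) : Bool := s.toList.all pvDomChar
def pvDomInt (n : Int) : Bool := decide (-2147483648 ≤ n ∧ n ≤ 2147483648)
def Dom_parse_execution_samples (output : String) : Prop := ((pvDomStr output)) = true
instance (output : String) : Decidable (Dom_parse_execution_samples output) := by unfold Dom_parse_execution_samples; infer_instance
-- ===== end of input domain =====

-- B replaces A's single fused loop with four mutating counters by an extract-names pass
-- followed by four independent counts (objective: alternative decomposition, same cost).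

-- ===== PORT A =====
-- one fused loop step: the four counters threaded as a tuple, branches in A's order
def pvStepA (st : Int × Int × Int × Int) (line : List Char) : Int × Int × Int × Int :=
  if PySem.Chars.isIn "sampledThread =".toList line then
    let total := st.1 + 1
    let thread_name : List Char :=
      if PySem.Chars.isIn "\"".toList line then
        PySem.List.pyGetD (PySem.Chars.splitOn line "\"".toList) 1 []
      else []
    if thread_name.isEmpty then (total, st.2.1 + 1, st.2.2.1, st.2.2.2)
    else if PySem.Chars.isIn "ForkJoinPool".toList thread_name
            || PySem.Chars.isIn "VirtualThread".toList thread_name then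
      (total, st.2.1, st.2.2.1 + 1, st.2.2.2)
    else if PySem.Chars.isIn "executor-thread".toList thread_name
            || PySem.Chars.startswith thread_name "io.".toList then
      (total, st.2.1, st.2.2.1, st.2.2.2 + 1)
    else (total, st.2.1, st.2.2.1, st.2.2.2)
  else st

def parse_execution_samples (output : String) : Int × Int × Int × Int :=
  (PySem.Chars.splitOn output.toList "\n".toList).foldl pvStepA (0, 0, 0, 0)

-- ===== PORT B =====
-- name extracted from one sample line (the comprehension's element expression)
def pvName (line : List Char) : List Char :=
  if PySem.Chars.isIn "\"".toList line then
    PySem.List.pyGetD (PySem.Chars.splitOn line "\"".toList) 1 []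
  else []

def pvHot (n : List Char) : Bool :=
  PySem.Chars.isIn "ForkJoinPool".toList n || PySem.Chars.isIn "VirtualThread".toList n

def pvApp (n : List Char) : Bool :=
  PySem.Chars.isIn "executor-thread".toList n || PySem.Chars.startswith n "io.".toList

def parse_execution_samples_alt (output : String) : Int × Int × Int × Int :=
  let names :=
    ((PySem.Chars.splitOn output.toList "\n".toList).filter
      (fun l => PySem.Chars.isIn "sampledThread =".toList l)).map pvName
  ((names.length : Int),
   (names.countP (fun n => n.isEmpty) : Int),
   (names.countP (fun n => !n.isEmpty && pvHot n) : Int),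
   (names.countP (fun n => !n.isEmpty && !pvHot n && pvApp n) : Int))

-- ===== PRECONDITION & SPEC =====
def Spec_parse_execution_samples (output : String) (out : Int × Int × Int × Int) : Prop := out = parse_execution_samples_alt output
instance (output : String) (out : Int × Int × Int × Int) : Decidable (Spec_parse_execution_samples output out) := by unfold Spec_parse_execution_samples; infer_instance

-- ===== CLAIM (what is proved, stated in full; the proofs are below) =====
def Claim_equal_parse_execution_samples : Prop := ∀ (output : String), Dom_parse_execution_samples output → Spec_parse_execution_samples output (parse_execution_samples output)

-- ===== LEMMAS AND PROOFS =====

-- loop invariant: folding A's step over any list of lines adds B's four counts to the accumulator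
theorem pvFold_eq (lines : List (List Char)) (t v f a : Int) :
    lines.foldl pvStepA (t, v, f, a) =
      (t + ((lines.filter (fun l => PySem.Chars.isIn "sampledThread =".toList l)).map pvName).length,
       v + ((lines.filter (fun l => PySem.Chars.isIn "sampledThread =".toList l)).map pvName).countP (fun n => n.isEmpty),
       f + ((lines.filter (fun l => PySem.Chars.isIn "sampledThread =".toList l)).map pvName).countP (fun n => !n.isEmpty && pvHot n),
       a + ((lines.filter (fun l => PySem.Chars.isIn "sampledThread =".toList l)).map pvName).countP (fun n => !n.isEmpty && !pvHot n && pvApp n)) := by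
  induction lines generalizing t v f a with
  | nil => simp
  | cons l ls ih =>
    by_cases hp : PySem.Chars.isIn "sampledThread =".toList l = true
    · have hstep : pvStepA (t, v, f, a) l =
        (t + 1,
         v + (if (pvName l).isEmpty then 1 else 0),
         f + (if !(pvName l).isEmpty && pvHot (pvName l) then 1 else 0),
         a + (if !(pvName l).isEmpty && !pvHot (pvName l) && pvApp (pvName l) then 1 else 0)) := by
        simp only [pvStepA, pvName, pvHot, pvApp, hp, if_true]
        split_ifs <;> simp_all
      simp only [List.foldl_cons, hstep, ih, List.filter_cons, hp, if_true, List.map_cons,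
        List.countP_cons, List.length_cons, Prod.mk.injEq]
      push_cast
      refine ⟨by omega, ?_, ?_, ?_⟩ <;> split_ifs <;> simp_all <;> omega
    · simp only [List.foldl_cons, pvStepA, hp]
      simp only [Bool.false_eq_true, if_false, ih, List.filter_cons, hp]

-- ===== VERDICT (by name: the statement is the Claim_ definition above) =====
theorem parse_execution_samples_spec : Claim_equal_parse_execution_samples := by
  intro output _
  show _ = _
  simp only [parse_execution_samples, parse_execution_samples_alt, pvFold_eq]
  simp
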